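-- pv_equiv track=rewrite | github.com/YODA-Lab/Algorithmic-Filtering-Out-Group-Stereotype-and-Polarization-on-Social-Media | TrackBimodal.py | isBimodal
-- ===== SOURCE A (Python) =====
-- import math
--
-- THRESHOLD = 20 # a local maxima must have value at least this much
--
-- def isBimodal(hist):
--     '''
--     Checks if a given histogram (list of integers) is a bimodal distribution
--     '''
--     localMaxes = getLocalMaxima(hist,threshold=THRESHOLD)
--     if len(localMaxes) <= 1:
--         return False
--
--     for i in localMaxes:
--         for j in localMaxes:
--             if i == j:
--                 continue
--             else:
--                 if containsValley(hist,i,j):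
--                     return True
--     return False
--
-- def getLocalMaxima(hist,threshold=0):
--     '''
--     Returns the indices of the local maxima
--     '''
--     ret = []
--     for i in range(len(hist)):
--         if i == 0:
--             if hist[1] < hist[0] and hist[i]>=threshold:
--                 ret.append(i)
--         elif i == len(hist)-1:
--             if hist[-1] > hist[-2] and hist[i]>=threshold:
--                 ret.append(i)
--         else:
--             if hist[i] >= hist[i-1] and hist[i] > hist[i+1] and hist[i]>=threshold:
--                 ret.append(i)
--     return ret
--
-- def containsValley(hist,i,j):
--     '''
--     Returns true only if there is a bucket between i and j that has value at most half of the
--     smaller of the two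
--     '''
--     bar = math.floor(min(hist[i],hist[j])/2)
--     for m in range(i+1,j):
--         if hist[m] <= bar:
--             return True
--     return False
-- ===== SOURCE B (Python) =====
-- THRESHOLD = 20  # a local maxima must have value at least this much
--
--
-- def isBimodal(hist):
--     '''
--     Single forward pass: keep the best peak value seen so far and the smallest
--     doubled value of any bucket that already qualifies as a valley w.r.t. some
--     earlier peak; report bimodal as soon as a peak closes such a valley.
--     '''
--     n = len(hist)
--     if n < 2:
--         return False
--
--     def is_peak(i):
--         if hist[i] < THRESHOLD:
--             return False
--         if i == 0:
--             return hist[1] < hist[0]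
--         if i == n - 1:
--             return hist[n - 1] > hist[n - 2]
--         return hist[i - 1] <= hist[i] and hist[i] > hist[i + 1]
--
--     best = None   # largest peak value at an index < m
--     vmin = None   # min over m' < m (with 2*hist[m'] <= best-at-time-m') of 2*hist[m']
--     for m in range(n):
--         hm = hist[m]
--         peak = is_peak(m)
--         if peak and vmin is not None and vmin <= hm:
--             return True
--         if best is not None and 2 * hm <= best:
--             if vmin is None or 2 * hm < vmin:
--                 vmin = 2 * hm
--         if peak:
--             best = hm if best is None else max(best, hm)
--     return False
-- ===== Notes on version B (the rewrite author's own statement) =====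
-- stated objective: faster
-- what changed: Replaced the all-pairs scan over local maxima with nested valley searches by a single forward pass that maintains the best peak value seen so far and the minimal doubled bucket value already qualifying as a valley, detecting a bimodal pattern the moment a second peak closes such a valley.
import Mathlib
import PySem

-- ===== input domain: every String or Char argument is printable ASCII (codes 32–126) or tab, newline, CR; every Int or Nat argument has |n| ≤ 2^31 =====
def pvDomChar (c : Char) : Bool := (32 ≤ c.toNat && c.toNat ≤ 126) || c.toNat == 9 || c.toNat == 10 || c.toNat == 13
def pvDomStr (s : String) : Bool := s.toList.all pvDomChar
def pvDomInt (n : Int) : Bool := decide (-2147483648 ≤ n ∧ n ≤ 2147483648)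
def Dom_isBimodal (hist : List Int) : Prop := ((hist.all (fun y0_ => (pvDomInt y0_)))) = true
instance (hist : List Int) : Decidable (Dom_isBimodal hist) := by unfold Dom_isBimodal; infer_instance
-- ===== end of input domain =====

-- B replaces A's all-pairs scan over the local maxima (each pair re-scanning the histogram
-- for a valley) by one forward pass over the histogram; objective: faster.

-- ===== PORT A =====
-- port of getLocalMaxima(hist, threshold)
def getLocalMaxima (hist : List Int) (threshold : Int) : List Int :=
  (PySem.List.pyRange 0 (hist.length : Int) 1).foldl (fun ret i =>
    if i = 0 then
      (if PySem.List.pyGetD hist 1 0 < PySem.List.pyGetD hist 0 0 ∧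
          threshold ≤ PySem.List.pyGetD hist i 0 then ret ++ [i] else ret)
    else if i = (hist.length : Int) - 1 then
      (if PySem.List.pyGetD hist (-2) 0 < PySem.List.pyGetD hist (-1) 0 ∧
          threshold ≤ PySem.List.pyGetD hist i 0 then ret ++ [i] else ret)
    else
      (if PySem.List.pyGetD hist (i - 1) 0 ≤ PySem.List.pyGetD hist i 0 ∧
          PySem.List.pyGetD hist (i + 1) 0 < PySem.List.pyGetD hist i 0 ∧
          threshold ≤ PySem.List.pyGetD hist i 0 then ret ++ [i] else ret)) []

-- port of containsValley(hist, i, j); math.floor(min(...)/2) on ints is floor division by 2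
def containsValley (hist : List Int) (i j : Int) : Bool :=
  let bar := PySem.Int.floordiv (min (PySem.List.pyGetD hist i 0) (PySem.List.pyGetD hist j 0)) 2
  (PySem.List.pyRange (i + 1) j 1).any (fun m => PySem.List.pyGetD hist m 0 ≤ bar)

def isBimodal (hist : List Int) : Bool :=
  let localMaxes := getLocalMaxima hist 20
  if localMaxes.length ≤ 1 then false
  else localMaxes.any (fun i => localMaxes.any (fun j =>
    if i = j then false else containsValley hist i j))

-- ===== PORT B =====
-- port of B's is_peak(i) (n = hist.length inlined; B only calls it with i < hist.length and 2 ≤ hist.length)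
def altPeak (hist : List Int) (i : Nat) : Bool :=
  if hist.getD i 0 < 20 then false
  else if i = 0 then decide (hist.getD 1 0 < hist.getD 0 0)
  else if i = hist.length - 1 then
    decide (hist.getD (hist.length - 2) 0 < hist.getD (hist.length - 1) 0)
  else decide (hist.getD (i - 1) 0 ≤ hist.getD i 0 ∧ hist.getD i 0 > hist.getD (i + 1) 0)

-- port of B's main loop over m with state (best, vmin)
def altLoop (hist : List Int) (m : Nat) (best vmin : Option Int) : Bool :=
  if h : m < hist.length then
    let hm := hist.getD m 0
    let peak := altPeak hist m
    if peak && (match vmin with | some v => decide (v ≤ hm) | none => false) then true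
    else
      let vmin' := match best with
        | some b =>
          if 2 * hm ≤ b then
            (match vmin with
              | none => some (2 * hm)
              | some v => if 2 * hm < v then some (2 * hm) else some v)
          else vmin
        | none => vmin
      let best' := if peak then some (match best with | none => hm | some b => max b hm) else best
      altLoop hist (m + 1) best' vmin'
  else false
termination_by hist.length - m

def isBimodal_alt (hist : List Int) : Bool :=
  if hist.length < 2 then false else altLoop hist 0 none none

-- ===== PRECONDITION & SPEC =====
-- Pre_ excludes exactly the single-element histograms, on which A raises IndexError
-- (getLocalMaxima reads hist[1]).
def Pre_isBimodal (hist : List Int) : Prop := hist.length ≠ 1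
instance (hist : List Int) : Decidable (Pre_isBimodal hist) := by unfold Pre_isBimodal; infer_instance

def pvWitness_isBimodal : List Int := [25, 0, 30, 5]

def Spec_isBimodal (hist : List Int) (out : Bool) : Prop := out = isBimodal_alt hist
instance (hist : List Int) (out : Bool) : Decidable (Spec_isBimodal hist out) := by unfold Spec_isBimodal; infer_instance

-- ===== CLAIM (what is proved, stated in full; the proofs are below) =====
def Claim_equal_isBimodal : Prop := ∀ (hist : List Int), Dom_isBimodal hist → Pre_isBimodal hist → Spec_isBimodal hist (isBimodal hist)

-- ===== LEMMAS AND PROOFS =====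

-- shorthand used only by the proofs
def hAt (hist : List Int) (i : Nat) : Int := hist.getD i 0

-- the common "bimodal" proposition both programs decide: a peak on each side of a
-- bucket at most half the smaller of the two
def BimodalProp (hist : List Int) : Prop :=
  ∃ i m j : Nat, i < m ∧ m < j ∧ j < hist.length ∧
    altPeak hist i = true ∧ altPeak hist j = true ∧
    2 * hAt hist m ≤ min (hAt hist i) (hAt hist j)

-- largest peak value among indices < m (B's `best` state)
def maxBelow (hist : List Int) : Nat → Option Int
  | 0 => none
  | m + 1 =>
    if altPeak hist m then
      some (match maxBelow hist m with
        | none => hAt hist m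
        | some b => max b (hAt hist m))
    else maxBelow hist m

-- smallest doubled qualified-valley value among indices < m (B's `vmin` state)
def minQual (hist : List Int) : Nat → Option Int
  | 0 => none
  | m + 1 =>
    match maxBelow hist m with
    | some b =>
      if 2 * hAt hist m ≤ b then
        (match minQual hist m with
          | none => some (2 * hAt hist m)
          | some v => if 2 * hAt hist m < v then some (2 * hAt hist m) else some v)
      else minQual hist m
    | none => minQual hist m

-- m is a valley w.r.t. some earlier peak
def Qual (hist : List Int) (m : Nat) : Prop :=
  ∃ i, i < m ∧ altPeak hist i = true ∧ 2 * hAt hist m ≤ hAt hist i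

theorem maxBelow_le_iff (hist : List Int) (m : Nat) (c : Int) :
    (∃ v, maxBelow hist m = some v ∧ c ≤ v) ↔
      ∃ i, i < m ∧ altPeak hist i = true ∧ c ≤ hAt hist i := by
  induction m with
  | zero => simp [maxBelow]
  | succ m ih =>
    constructor
    · rintro ⟨v, hv, hc⟩
      rw [maxBelow] at hv
      by_cases hp : altPeak hist m = true
      · rw [if_pos hp] at hv
        rcases hmb : maxBelow hist m with _ | b
        · rw [hmb] at hv
          simp at hv
          exact ⟨m, Nat.lt_succ_self m, hp, by omega⟩
        · rw [hmb] at hv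
          simp at hv
          by_cases hcb : c ≤ b
          · obtain ⟨i, hi, hpi, hci⟩ := ih.mp ⟨b, hmb, hcb⟩
            exact ⟨i, Nat.lt_succ_of_lt hi, hpi, hci⟩
          · exact ⟨m, Nat.lt_succ_self m, hp, by omega⟩
      · rw [if_neg hp] at hv
        obtain ⟨i, hi, hpi, hci⟩ := ih.mp ⟨v, hv, hc⟩
        exact ⟨i, Nat.lt_succ_of_lt hi, hpi, hci⟩
    · rintro ⟨i, hi, hpi, hci⟩
      rw [maxBelow]
      by_cases him : i = m
      · subst him
        rw [if_pos hpi]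
        rcases hmb : maxBelow hist i with _ | b
        · exact ⟨hAt hist i, rfl, hci⟩
        · exact ⟨max b (hAt hist i), rfl, le_max_of_le_right hci⟩
      · have : i < m := by omega
        obtain ⟨v, hv, hc⟩ := ih.mpr ⟨i, this, hpi, hci⟩
        by_cases hp : altPeak hist m = true
        · rw [if_pos hp, hv]
          exact ⟨max v (hAt hist m), rfl, le_max_of_le_left hc⟩
        · rw [if_neg hp]
          exact ⟨v, hv, hc⟩

theorem minQual_le_iff (hist : List Int) (m : Nat) (c : Int) :
    (∃ v, minQual hist m = some v ∧ v ≤ c) ↔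
      ∃ m', m' < m ∧ Qual hist m' ∧ 2 * hAt hist m' ≤ c := by
  induction m with
  | zero => simp [minQual]
  | succ m ih =>
    have hq : Qual hist m ↔ ∃ v, maxBelow hist m = some v ∧ 2 * hAt hist m ≤ v :=
      (maxBelow_le_iff hist m (2 * hAt hist m)).symm
    have hsplit : (∃ m', m' < m + 1 ∧ Qual hist m' ∧ 2 * hAt hist m' ≤ c) ↔
        ((Qual hist m ∧ 2 * hAt hist m ≤ c) ∨ (∃ m', m' < m ∧ Qual hist m' ∧ 2 * hAt hist m' ≤ c)) := by
      constructor
      · rintro ⟨m', hm', hqm', hcm'⟩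
        by_cases h : m' = m
        · subst h; exact Or.inl ⟨hqm', hcm'⟩
        · exact Or.inr ⟨m', by omega, hqm', hcm'⟩
      · rintro (⟨hqm, hcm⟩ | ⟨m', hm', hqm', hcm'⟩)
        · exact ⟨m, Nat.lt_succ_self m, hqm, hcm⟩
        · exact ⟨m', Nat.lt_succ_of_lt hm', hqm', hcm'⟩
    rw [hsplit, minQual]
    rcases hmb : maxBelow hist m with _ | b <;> dsimp only
    · have hnq : ¬ Qual hist m := by
        rw [hq]; rintro ⟨v, hv, _⟩; rw [hmb] at hv; simp at hv
      rw [ih]; tauto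
    · by_cases hcond : 2 * hAt hist m ≤ b
      · rw [if_pos hcond]
        have hqm : Qual hist m := hq.mpr ⟨b, hmb, hcond⟩
        rcases hmq : minQual hist m with _ | v
        ·
          have hold : ¬ (∃ m', m' < m ∧ Qual hist m' ∧ 2 * hAt hist m' ≤ c) := by
            rw [← ih]; rintro ⟨v, hv, _⟩; rw [hmq] at hv; simp at hv
          simp only [Option.some.injEq]
          constructor
          · rintro ⟨v', hv', hle⟩; exact Or.inl ⟨hqm, by omega⟩
          · rintro (⟨_, hle⟩ | hother)
            · exact ⟨2 * hAt hist m, rfl, hle⟩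
            · exact absurd hother hold
        · dsimp only
          have hold : (v ≤ c) ↔ (∃ m', m' < m ∧ Qual hist m' ∧ 2 * hAt hist m' ≤ c) := by
            rw [← ih]
            constructor
            · intro h; exact ⟨v, hmq, h⟩
            · rintro ⟨v', hv', h⟩; rw [hmq] at hv'; cases hv'; exact h
          by_cases hlt : 2 * hAt hist m < v
          · rw [if_pos hlt]
            constructor
            · rintro ⟨v', hv', hle⟩
              cases hv'
              exact Or.inl ⟨hqm, hle⟩
            · rintro (⟨_, hle⟩ | hother)
              · exact ⟨2 * hAt hist m, rfl, hle⟩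
              · refine ⟨2 * hAt hist m, rfl, ?_⟩
                have := hold.mpr hother; omega
          · rw [if_neg hlt]
            constructor
            · rintro ⟨v', hv', hle⟩
              cases hv'
              exact Or.inr (hold.mp hle)
            · rintro (⟨_, hle⟩ | hother)
              · exact ⟨v, rfl, by omega⟩
              · exact ⟨v, rfl, hold.mpr hother⟩
      · rw [if_neg hcond]
        have hnq : ¬ Qual hist m := by
          rw [hq]; rintro ⟨v, hv, hle⟩; rw [hmb] at hv; cases hv; omega
        rw [ih]; tauto

theorem maxBelow_succ (hist : List Int) (m : Nat) : maxBelow hist (m + 1) =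
    if altPeak hist m = true then
      some (match maxBelow hist m with
        | none => hist.getD m 0
        | some b => max b (hist.getD m 0))
    else maxBelow hist m := by rw [maxBelow]; rfl

theorem minQual_succ (hist : List Int) (m : Nat) : minQual hist (m + 1) =
    match maxBelow hist m with
    | some b =>
      if 2 * hist.getD m 0 ≤ b then
        match minQual hist m with
        | none => some (2 * hist.getD m 0)
        | some v => if 2 * hist.getD m 0 < v then some (2 * hist.getD m 0) else some v
      else minQual hist m
    | none => minQual hist m := by rw [minQual]; rfl

theorem checkProp (hist : List Int) (m : Nat) :
    (altPeak hist m &&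
        match minQual hist m with
        | some v => decide (v ≤ hist.getD m 0)
        | none => false) = true ↔
      (altPeak hist m = true ∧ ∃ m', m' < m ∧ Qual hist m' ∧ 2 * hAt hist m' ≤ hAt hist m) := by
  rw [Bool.and_eq_true, ← minQual_le_iff hist m (hAt hist m)]
  rcases hmq : minQual hist m with _ | v <;> simp [hAt]

theorem altLoop_iff (hist : List Int) :
    ∀ k m, hist.length ≤ m + k →
    (altLoop hist m (maxBelow hist m) (minQual hist m) = true ↔
      ∃ j, m ≤ j ∧ j < hist.length ∧ altPeak hist j = true ∧
        ∃ m', m' < j ∧ Qual hist m' ∧ 2 * hAt hist m' ≤ hAt hist j) := by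
  intro k
  induction k with
  | zero =>
    intro m hm
    rw [altLoop, dif_neg (by omega)]
    constructor
    · intro h; exact absurd h (by simp)
    · rintro ⟨j, hj1, hj2, _⟩; omega
  | succ k ih =>
    intro m hm
    by_cases hlt : m < hist.length
    · rw [altLoop, dif_pos hlt]
      dsimp only
      rw [← maxBelow_succ, ← minQual_succ]
      by_cases hchk : (altPeak hist m &&
          match minQual hist m with
          | some v => decide (v ≤ hist.getD m 0)
          | none => false) = true
      · rw [if_pos hchk]
        obtain ⟨hpm, m', hm', hq, hle⟩ := (checkProp hist m).mp hchk
        simp only [true_iff]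
        exact ⟨m, le_refl m, hlt, hpm, m', hm', hq, hle⟩
      · rw [if_neg hchk]
        rw [ih (m + 1) (by omega)]
        constructor
        · rintro ⟨j, hj1, hj2, hp, rest⟩
          exact ⟨j, by omega, hj2, hp, rest⟩
        · rintro ⟨j, hj1, hj2, hp, m', hm', hq, hle⟩
          by_cases hjm : j = m
          · subst hjm
            exact absurd ((checkProp hist j).mpr ⟨hp, m', hm', hq, hle⟩) hchk
          · exact ⟨j, by omega, hj2, hp, m', hm', hq, hle⟩
    · rw [altLoop, dif_neg hlt]
      constructor
      · intro h; exact absurd h (by simp)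
      · rintro ⟨j, hj1, hj2, _⟩; omega

theorem alt_iff (hist : List Int) : isBimodal_alt hist = true ↔ BimodalProp hist := by
  unfold isBimodal_alt
  by_cases hn : hist.length < 2
  · rw [if_pos hn]
    constructor
    · intro h; exact absurd h (by simp)
    · rintro ⟨i, m, j, h1, h2, h3, _⟩; omega
  · rw [if_neg hn]
    have heq : altLoop hist 0 none none = altLoop hist 0 (maxBelow hist 0) (minQual hist 0) := rfl
    rw [heq, altLoop_iff hist hist.length 0 (by omega)]
    constructor
    · rintro ⟨j, _, hj, hpj, m', hm', ⟨i, hi, hpi, hlei⟩, hlej⟩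
      exact ⟨i, m', j, hi, hm', hj, hpi, hpj, le_min hlei hlej⟩
    · rintro ⟨i, m, j, h1, h2, h3, hpi, hpj, hle⟩
      exact ⟨j, by omega, h3, hpj, m, h2, ⟨i, h1, hpi, le_trans hle (min_le_left _ _)⟩,
        le_trans hle (min_le_right _ _)⟩

-- Bool form of A's local-maximum test at Int index i
def condA (hist : List Int) (i : Int) : Bool :=
  if i = 0 then
    decide (PySem.List.pyGetD hist 1 0 < PySem.List.pyGetD hist 0 0 ∧
      (20:Int) ≤ PySem.List.pyGetD hist i 0)
  else if i = (hist.length : Int) - 1 then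
    decide (PySem.List.pyGetD hist (-2) 0 < PySem.List.pyGetD hist (-1) 0 ∧
      (20:Int) ≤ PySem.List.pyGetD hist i 0)
  else
    decide (PySem.List.pyGetD hist (i - 1) 0 ≤ PySem.List.pyGetD hist i 0 ∧
      PySem.List.pyGetD hist (i + 1) 0 < PySem.List.pyGetD hist i 0 ∧
      (20:Int) ≤ PySem.List.pyGetD hist i 0)

theorem getLocalMaxima_eq_filter (hist : List Int) :
    getLocalMaxima hist 20 = (PySem.List.pyRange 0 (hist.length : Int) 1).filter (condA hist) := by
  unfold getLocalMaxima
  have hcongr := PySem.List.foldl_congr_mem'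
    (l := PySem.List.pyRange 0 (hist.length : Int) 1) (init := ([] : List Int))
    (f := fun ret i =>
      if i = 0 then
        (if PySem.List.pyGetD hist 1 0 < PySem.List.pyGetD hist 0 0 ∧
            (20:Int) ≤ PySem.List.pyGetD hist i 0 then ret ++ [i] else ret)
      else if i = (hist.length : Int) - 1 then
        (if PySem.List.pyGetD hist (-2) 0 < PySem.List.pyGetD hist (-1) 0 ∧
            (20:Int) ≤ PySem.List.pyGetD hist i 0 then ret ++ [i] else ret)
      else
        (if PySem.List.pyGetD hist (i - 1) 0 ≤ PySem.List.pyGetD hist i 0 ∧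
            PySem.List.pyGetD hist (i + 1) 0 < PySem.List.pyGetD hist i 0 ∧
            (20:Int) ≤ PySem.List.pyGetD hist i 0 then ret ++ [i] else ret))
    (g := fun ret i => if condA hist i then ret ++ [i] else ret)
    (by intro i _ ret
        dsimp only
        by_cases h0 : i = 0
        · simp [condA, h0]
        · by_cases h1 : i = (hist.length : Int) - 1 <;> simp [condA, h0, h1] <;>
            (try split_ifs) <;> tauto)
  exact hcongr.trans (by rw [PySem.List.foldl_append_if_eq_filter]; simp)

theorem mem_getLocalMaxima (hist : List Int) (x : Int) :
    x ∈ getLocalMaxima hist 20 ↔ 0 ≤ x ∧ x < (hist.length : Int) ∧ condA hist x = true := by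
  rw [getLocalMaxima_eq_filter, List.mem_filter, PySem.List.mem_pyRange_one]
  tauto

theorem condA_eq_altPeak (hist : List Int) (hn : 2 ≤ hist.length) (i : Nat) (hi : i < hist.length) :
    condA hist (i : Int) = altPeak hist i := by
  have hAm1 : PySem.List.pyGetD hist (-1) 0 = (hist[hist.length - 1]?).getD 0 := by
    rw [PySem.List.pyGetD_neg_ofNat hist 1 0 (by omega) (by omega),
        List.getElem?_eq_getElem (by omega)]
    rfl
  have hAm2 : PySem.List.pyGetD hist (-2) 0 = (hist[hist.length - 2]?).getD 0 := by
    rw [PySem.List.pyGetD_neg_ofNat hist 2 0 (by omega) (by omega),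
        List.getElem?_eq_getElem (by omega)]
    rfl
  rw [Bool.eq_iff_iff]
  unfold condA altPeak
  by_cases h0 : i = 0
  · subst h0
    simp only [Nat.cast_zero, hAm1, hAm2,
      PySem.List.pyGetD_ofNat', List.getD_eq_getElem?_getD]
    split_ifs with hthr h00 <;> simp_all
  · by_cases h1 : i = hist.length - 1
    · subst h1
      rw [if_neg (by omega : ¬ ((hist.length - 1 : Nat) : Int) = 0),
          if_pos (by omega : ((hist.length - 1 : Nat) : Int) = (hist.length : Int) - 1)]
      simp only [hAm1, hAm2, PySem.List.pyGetD_natCast, List.getD_eq_getElem?_getD]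
      split_ifs <;> simp_all
    · rw [if_neg (by omega : ¬ ((i : Nat) : Int) = 0),
          if_neg (by omega : ¬ ((i : Nat) : Int) = (hist.length : Int) - 1),
          show ((i : Int) - 1) = ((i - 1 : Nat) : Int) by omega,
          show ((i : Int) + 1) = ((i + 1 : Nat) : Int) by omega]
      simp only [PySem.List.pyGetD_natCast, List.getD_eq_getElem?_getD]
      rw [if_neg h0, if_neg h1]
      split_ifs with hthr <;> simp_all

theorem containsValley_iff (hist : List Int) (a b : Nat) :
    containsValley hist (a : Int) (b : Int) = true ↔
      ∃ m : Nat, a < m ∧ m < b ∧ 2 * hAt hist m ≤ min (hAt hist a) (hAt hist b) := by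
  unfold containsValley
  rw [List.any_eq_true]
  constructor
  · rintro ⟨x, hx, hle⟩
    rw [PySem.List.mem_pyRange_one] at hx
    obtain ⟨hx1, hx2⟩ := hx
    have hx0 : 0 ≤ x := by omega
    refine ⟨x.toNat, by omega, by omega, ?_⟩
    rw [decide_eq_true_eq] at hle
    rw [PySem.Int.le_floordiv_iff_mul_le (by omega)] at hle
    rw [PySem.List.pyGetD_of_nonneg (h := hx0)] at hle
    simp only [PySem.List.pyGetD_natCast] at hle
    unfold hAt
    omega
  · rintro ⟨m, hm1, hm2, hle⟩
    refine ⟨(m : Int), ?_, ?_⟩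
    · rw [PySem.List.mem_pyRange_one]; omega
    · rw [decide_eq_true_eq, PySem.Int.le_floordiv_iff_mul_le (by omega)]
      simp only [PySem.List.pyGetD_natCast]
      unfold hAt at hle
      omega

theorem a_iff (hist : List Int) (hpre : hist.length ≠ 1) :
    isBimodal hist = true ↔ BimodalProp hist := by
  unfold isBimodal
  by_cases hlen : (getLocalMaxima hist 20).length ≤ 1
  · rw [if_pos hlen]
    constructor
    · intro h; exact absurd h (by simp)
    · rintro ⟨i, m, j, h1, h2, h3, hpi, hpj, hle⟩
      exfalso
      have hn2 : 2 ≤ hist.length := by omega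
      have hmi : (i : Int) ∈ getLocalMaxima hist 20 := by
        rw [mem_getLocalMaxima]
        refine ⟨by omega, by omega, ?_⟩
        rw [condA_eq_altPeak hist hn2 i (by omega)]; exact hpi
      have hmj : (j : Int) ∈ getLocalMaxima hist 20 := by
        rw [mem_getLocalMaxima]
        refine ⟨by omega, by omega, ?_⟩
        rw [condA_eq_altPeak hist hn2 j (by omega)]; exact hpj
      have hne : (i : Int) ≠ (j : Int) := by omega
      rcases hL : getLocalMaxima hist 20 with _ | ⟨x, _ | ⟨y, t⟩⟩
      · rw [hL] at hmi; exact absurd hmi (by simp)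
      · rw [hL] at hmi hmj
        rw [List.mem_singleton] at hmi hmj
        exact hne (hmi.trans hmj.symm)
      · rw [hL] at hlen; simp at hlen
  · rw [if_neg hlen]
    have hn2 : 2 ≤ hist.length := by
      by_contra hc
      have h0 : hist.length = 0 := by omega
      have : getLocalMaxima hist 20 = [] := by
        rw [getLocalMaxima_eq_filter, h0]
        rfl
      rw [this] at hlen; simp at hlen
    rw [List.any_eq_true]
    constructor
    · rintro ⟨x, hx, hin⟩
      rw [List.any_eq_true] at hin
      obtain ⟨y, hy, hxy⟩ := hin
      by_cases heq : x = y
      · rw [if_pos heq] at hxy; exact absurd hxy (by simp)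
      · rw [if_neg heq] at hxy
        rw [mem_getLocalMaxima] at hx hy
        obtain ⟨hx0, hxn, hcx⟩ := hx
        obtain ⟨hy0, hyn, hcy⟩ := hy
        have hxx : x = ((x.toNat : Nat) : Int) := by omega
        have hyy : y = ((y.toNat : Nat) : Int) := by omega
        rw [hxx, hyy] at hxy
        rw [containsValley_iff hist x.toNat y.toNat] at hxy
        obtain ⟨m, hm1, hm2, hle⟩ := hxy
        refine ⟨x.toNat, m, y.toNat, hm1, hm2, by omega, ?_, ?_, hle⟩
        · rw [← condA_eq_altPeak hist hn2 x.toNat (by omega), ← hxx]; exact hcx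
        · rw [← condA_eq_altPeak hist hn2 y.toNat (by omega), ← hyy]; exact hcy
    · rintro ⟨i, m, j, h1, h2, h3, hpi, hpj, hle⟩
      refine ⟨(i : Int), ?_, ?_⟩
      · rw [mem_getLocalMaxima]
        exact ⟨by omega, by omega, by rw [condA_eq_altPeak hist hn2 i (by omega)]; exact hpi⟩
      · rw [List.any_eq_true]
        refine ⟨(j : Int), ?_, ?_⟩
        · rw [mem_getLocalMaxima]
          exact ⟨by omega, by omega, by rw [condA_eq_altPeak hist hn2 j (by omega)]; exact hpj⟩
        · rw [if_neg (by omega : ¬ ((i:Nat) : Int) = ((j:Nat) : Int))]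
          rw [containsValley_iff hist i j]
          exact ⟨m, h1, h2, hle⟩

-- ===== VERDICT (by name: the statement is the Claim_ definition above) =====
theorem isBimodal_spec : Claim_equal_isBimodal := by
  intro hist _ hpre
  unfold Spec_isBimodal
  rw [Bool.eq_iff_iff, a_iff hist hpre, alt_iff hist]
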